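-- pv_equiv track=rewrite | github.com/Lucas-Dalbo/hacker-rank-python-challenges | door_mat.py | door_mat
-- ===== SOURCE A (Python) =====
-- def door_mat(h, l):
--     detail = ".|."
--     text = "WELCOME"
--     center = (h // 2)
--     plain_mat = ["-"] * h
--
--     for i in range(0, center):
--         q = (2 * i) + 1
--         line = (detail * q).center(l, "-")
--         plain_mat[i] = line
--         tail = (i * (-1)) - 1
--         plain_mat[tail] = line
--     else:
--         line = text.center(l, "-")
--         plain_mat[center] = line
--
--     return "\n".join(plain_mat)
-- ===== SOURCE B (Python) =====
-- def door_mat(h, l):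
--     c = h // 2
--     lines = []
--     for j in range(h):
--         if j == c:
--             lines.append("WELCOME".center(l, "-"))
--         else:
--             k = j if j < c else h - 1 - j
--             lines.append((".|." * (2 * k + 1)).center(l, "-"))
--     return "\n".join(lines)
-- ===== Notes on version B (the rewrite author's own statement) =====
-- stated objective: simpler
-- what changed: Instead of preallocating a mutable list and writing each pattern row twice (mirrored via a negative index) in a half-height loop, B makes a single pass over every line index and computes each line directly from its position (j, h-1-j, or the center), so no array and no in-place writes are needed.
import Mathlib
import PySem

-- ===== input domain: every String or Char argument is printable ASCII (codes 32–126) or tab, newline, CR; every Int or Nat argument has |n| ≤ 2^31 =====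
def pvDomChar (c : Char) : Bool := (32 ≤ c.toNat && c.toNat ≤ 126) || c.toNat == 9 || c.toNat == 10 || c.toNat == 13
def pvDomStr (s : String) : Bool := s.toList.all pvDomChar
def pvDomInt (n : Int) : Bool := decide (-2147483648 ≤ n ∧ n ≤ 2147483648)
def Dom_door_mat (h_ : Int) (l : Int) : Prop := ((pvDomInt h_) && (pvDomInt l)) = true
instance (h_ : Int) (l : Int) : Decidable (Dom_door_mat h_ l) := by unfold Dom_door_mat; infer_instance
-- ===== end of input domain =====

-- B is a single pass computing each line from its index (no preallocated list with mirrored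
-- double writes); equivalence is about the return value only, and Pre_ excludes h_ ≤ 0 where A raises.

-- shared helper: exact port of CPython str.center(w, fill) on List Char
-- (left margin = marg // 2 + (marg & w & 1); here marg > 0 and w > 0, so the bit test is "both odd")
def pvCenter (cs : List Char) (w : Int) : List Char :=
  let n : Int := cs.length
  if w ≤ n then cs
  else
    let marg := w - n
    let left := PySem.Int.floordiv marg 2 + (if marg % 2 = 1 ∧ w % 2 = 1 then 1 else 0)
    List.replicate left.toNat '-' ++ cs ++ List.replicate (marg - left).toNat '-'

-- ===== PORT A =====
-- Python list assignment mat[i] = v with possibly negative index; exact where the index is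
-- in range (Python raises IndexError otherwise; Pre_door_mat excludes the only reachable case, h_ ≤ 0)
def pvSet (mat : List (List Char)) (i : Int) (v : List Char) : List (List Char) :=
  let j := if i < 0 then i + mat.length else i
  if 0 ≤ j ∧ j < mat.length then mat.set j.toNat v else mat

def door_mat (h_ : Int) (l : Int) : String :=
  let detail := ".|.".toList
  let text := "WELCOME".toList
  let center := PySem.Int.floordiv h_ 2
  let plain_mat : List (List Char) := List.replicate h_.toNat "-".toList
  let plain_mat := (PySem.List.pyRange 0 center).foldl
    (fun mat i =>
      let q := 2 * i + 1
      let line := pvCenter (PySem.List.pyRepeat detail q) l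
      let mat := pvSet mat i line
      let tail := i * (-1) - 1
      pvSet mat tail line) plain_mat
  let plain_mat := pvSet plain_mat center (pvCenter text l)
  String.mk (PySem.Chars.join "\n".toList plain_mat)

-- ===== PORT B =====
def pvRow (h_ : Int) (l : Int) (c : Int) (j : Int) : List Char :=
  if j = c then pvCenter "WELCOME".toList l
  else
    let k := if j < c then j else h_ - 1 - j
    pvCenter (PySem.List.pyRepeat ".|.".toList (2 * k + 1)) l

def door_mat_alt (h_ : Int) (l : Int) : String :=
  let c := PySem.Int.floordiv h_ 2
  String.mk (PySem.Chars.join "\n".toList ((PySem.List.pyRange 0 h_).map (pvRow h_ l c)))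

-- ===== PRECONDITION & SPEC =====
-- For h_ ≤ 0 the Python A raises IndexError (plain_mat[h_//2] on an empty list).
def Pre_door_mat (h_ : Int) (l : Int) : Prop := 1 ≤ h_
instance (h_ : Int) (l : Int) : Decidable (Pre_door_mat h_ l) := by unfold Pre_door_mat; infer_instance
def pvWitness_door_mat : Int × Int := (4, 9)

def Spec_door_mat (h_ : Int) (l : Int) (out : String) : Prop := out = door_mat_alt h_ l
instance (h_ : Int) (l : Int) (out : String) : Decidable (Spec_door_mat h_ l out) := by unfold Spec_door_mat; infer_instance

-- ===== CLAIM (what is proved, stated in full; the proofs are below) =====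
def Claim_equal_door_mat : Prop := ∀ (h_ : Int) (l : Int), Dom_door_mat h_ l → Pre_door_mat h_ l → Spec_door_mat h_ l (door_mat h_ l)

-- ===== LEMMAS AND PROOFS =====

-- characterization of A's loop: after folding over range(0, c), position j holds
-- the pattern line for j if j < c, for n-1-j if n-1-j < c, and "-" otherwise
theorem foldA_eq (F : Int → List Char) (d : List Char) (n : ℕ) :
    ∀ (c : ℕ), 2 * c ≤ n →
    ((PySem.List.pyRange 0 (c : ℤ)).foldl
      (fun mat i => pvSet (pvSet mat i (F i)) (i * (-1) - 1) (F i))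
      (List.replicate n d))
    = (List.range n).map (fun j =>
        if j < c then F (j : ℤ) else if n - 1 - j < c then F ((n : ℤ) - 1 - (j : ℤ)) else d) := by
  intro c
  induction c with
  | zero =>
    intro _
    rw [PySem.List.pyRange_one_eq_nil (by norm_num)]
    simp
  | succ c ih =>
    intro hc
    have h1 : ((c : ℤ) + 1) = ((c + 1 : ℕ) : ℤ) := by push_cast; ring
    have hcn : c < n := by omega
    rw [← h1, PySem.List.pyRange_one_succ_right (by positivity), List.foldl_append,
      ih (by omega)]
    simp only [List.foldl_cons, List.foldl_nil]
    set M : List (List Char) := (List.range n).map (fun j =>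
        if j < c then F (j : ℤ) else if n - 1 - j < c then F ((n : ℤ) - 1 - (j : ℤ)) else d) with hM
    have hMlen : M.length = n := by simp [hM]
    have e1 : pvSet M (c : ℤ) (F (c : ℤ)) = M.set c (F (c : ℤ)) := by
      unfold pvSet; dsimp only
      simp only [hMlen]
      have hcineg : ¬((c : ℤ) < 0) := by omega
      simp only [if_neg hcineg]
      rw [if_pos (by omega)]
      simp
    have e2 : pvSet (M.set c (F (c : ℤ))) ((c : ℤ) * (-1) - 1) (F (c : ℤ))
        = (M.set c (F (c : ℤ))).set (n - 1 - c) (F (c : ℤ)) := by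
      unfold pvSet; dsimp only
      simp only [List.length_set, hMlen]
      have hneg : ((c : ℤ) * (-1) - 1 < 0) := by omega
      simp only [if_pos hneg]
      rw [if_pos (by omega)]
      congr 1
      omega
    rw [e1, e2]
    apply List.ext_getElem
    · simp [hMlen]
    · intro j hj1 hj2
      have hjn : j < n := by simpa [hMlen] using hj1
      simp only [List.getElem_set, hM, List.getElem_map, List.getElem_range]
      split_ifs <;> first | rfl | (congr 1; omega) | omega | (exfalso; omega)

theorem pvSet_in_range (mat : List (List Char)) (i : Int) (v : List Char)
    (h0 : 0 ≤ i) (hlt : i < mat.length) : pvSet mat i v = mat.set i.toNat v := by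
  unfold pvSet; dsimp only
  simp only [if_neg (show ¬ i < 0 by omega)]
  rw [if_pos ⟨h0, hlt⟩]

theorem door_mat_spec : Claim_equal_door_mat := by
  intro h_ l _ hpre
  unfold Pre_door_mat at hpre
  unfold Spec_door_mat door_mat door_mat_alt
  dsimp only
  set c := PySem.Int.floordiv h_ 2 with hc
  have h2c : c * 2 ≤ h_ := (PySem.Int.le_floordiv_iff_mul_le (by norm_num)).mp le_rfl
  have hc0 : 0 ≤ c := (PySem.Int.le_floordiv_iff_mul_le (by norm_num)).mpr (by omega)
  have hup : h_ < (c + 1) * 2 := (PySem.Int.floordiv_lt_iff_lt_mul (by norm_num)).mp (by omega)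
  have hn : ((h_.toNat : ℤ)) = h_ := Int.toNat_of_nonneg (by omega)
  have hcN : ((c.toNat : ℤ)) = c := Int.toNat_of_nonneg hc0
  set n := h_.toNat with hndef
  set cN := c.toNat with hcNdef
  have hcn : 2 * cN ≤ n := by omega
  have hcnlt : cN < n := by omega
  have hntop : n ≤ 2 * cN + 1 := by omega
  rw [← hcN, ← hn,
    foldA_eq (fun i => pvCenter (PySem.List.pyRepeat ".|.".toList (2 * i + 1)) l) ("-".toList) n cN hcn,
    pvSet_in_range _ _ _ (by omega) (by simp; omega),
    PySem.List.pyRange_one]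
  simp only [Int.toNat_natCast, sub_zero, List.map_map]
  apply congrArg
  apply congrArg
  apply List.ext_getElem
  · simp
  · intro j hj1 hj2
    have hjn : j < n := by simpa using hj2
    simp only [List.getElem_set, List.getElem_map, List.getElem_range, Function.comp]
    unfold pvRow
    dsimp only
    split_ifs <;> first | rfl | (congr 2 <;> push_cast <;> omega) | omega
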